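-- pv_equiv track=rewrite | github.com/garrix0412/Quantum-Forge | core/pipeline_composer.py | _generic_pipeline_pattern
-- ===== SOURCE A (Python) =====
-- from typing import Dict, Any, List, Tuple, Optional
--
-- def _generic_pipeline_pattern(components: List[str]) -> List[str]:
--     """通用的流水线模式"""
--     pipeline = []
--
--     # 通用优先级
--     priority_order = [
--         ("ModelGenerator", "Model", "Parameter"),
--         ("HamiltonianBuilder", "Hamiltonian"),
--         ("CircuitBuilder", "Circuit", "Ansatz"),
--         ("Optimizer", "Optimization"),
--         ("Executor", "Execution")
--     ]
--
--     for priority_keywords in priority_order: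
--         for component in components:
--             if any(keyword in component for keyword in priority_keywords):
--                 if component not in pipeline:
--                     pipeline.append(component)
--                     break
--
--     # 添加未匹配的组件
--     for component in components:
--         if component not in pipeline:
--             pipeline.append(component)
--
--     return pipeline
-- ===== SOURCE B (Python) =====
-- from typing import List, Optional, Tuple
--
-- _PRIORITY_ORDER = [
--     ("ModelGenerator", "Model", "Parameter"),
--     ("HamiltonianBuilder", "Hamiltonian"),
--     ("CircuitBuilder", "Circuit", "Ansatz"),
--     ("Optimizer", "Optimization"),
--     ("Executor", "Execution")
-- ]
--
--
-- def _place_first_free(slots: List[Optional[str]], component: str) -> Tuple[List[Optional[str]], bool]: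
--     """Put component into the lowest free slot whose keywords match it, if any."""
--     for i in range(len(slots)):
--         if slots[i] is None and any(k in component for k in _PRIORITY_ORDER[i]):
--             return slots[:i] + [component] + slots[i + 1:], True
--     return slots, False
--
--
-- def _generic_pipeline_pattern(components: List[str]) -> List[str]:
--     # component-major single pass: assign each new component to its best free priority slot
--     slots: List[Optional[str]] = [None] * len(_PRIORITY_ORDER)
--     seen = set()
--     for component in components:
--         if component not in seen:
--             slots, placed = _place_first_free(slots, component)
--             if placed:
--                 seen.add(component)
--     pipeline = [s for s in slots if s is not None]
--     # append the remaining components in original order, without duplicates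
--     for component in components:
--         if component not in seen:
--             seen.add(component)
--             pipeline.append(component)
--     return pipeline
-- ===== Notes on version B (the rewrite author's own statement) =====
-- stated objective: faster
-- what changed: Inverted the loop nesting: instead of scanning the whole component list once per priority group (group-major, with list-membership dedup), B makes a single component-major pass that drops each new component into the lowest free matching priority slot, guarded by a seen-set, then emits slots followed by the unseen remainder.
import Mathlib
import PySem

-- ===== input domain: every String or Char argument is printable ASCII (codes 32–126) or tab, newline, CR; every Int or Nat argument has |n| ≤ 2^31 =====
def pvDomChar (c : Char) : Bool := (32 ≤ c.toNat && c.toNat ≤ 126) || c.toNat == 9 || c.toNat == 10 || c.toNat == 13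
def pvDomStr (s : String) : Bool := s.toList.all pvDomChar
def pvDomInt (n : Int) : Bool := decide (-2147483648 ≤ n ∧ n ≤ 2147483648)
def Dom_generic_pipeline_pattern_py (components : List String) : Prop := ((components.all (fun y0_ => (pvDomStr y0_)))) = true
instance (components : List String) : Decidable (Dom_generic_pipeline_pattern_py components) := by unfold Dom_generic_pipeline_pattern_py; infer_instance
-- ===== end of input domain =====

-- B inverts the loop nesting (component-major single pass into priority slots with a seen-set
-- instead of group-major rescans with list membership); return value proved equal on all inputs.


-- ===== PORT A =====
-- the priority_order constant (same literal in both Pythons)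
def pvKwGroups : List (List String) :=
  [["ModelGenerator", "Model", "Parameter"],
   ["HamiltonianBuilder", "Hamiltonian"],
   ["CircuitBuilder", "Circuit", "Ansatz"],
   ["Optimizer", "Optimization"],
   ["Executor", "Execution"]]

-- any(keyword in component for keyword in kws)
def pvMatch (kws : List String) (c : String) : Bool :=
  kws.any (fun k => PySem.Str.isIn k c)

-- A's inner 'for component in components: … break' for one priority group
def pvInnerA (pipeline : List String) (kws : List String) : List String → List String
  | [] => pipeline
  | c :: rest =>
      if pvMatch kws c then
        if pipeline.contains c then pvInnerA pipeline kws rest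
        else pipeline ++ [c]
      else pvInnerA pipeline kws rest

def generic_pipeline_pattern_py (components : List String) : List String :=
  let pipeline := pvKwGroups.foldl (fun p kws => pvInnerA p kws components) []
  components.foldl (fun p c => if p.contains c then p else p ++ [c]) pipeline

-- ===== PORT B =====
-- _place_first_free: lowest free slot whose keywords match, walking slots and groups together
def pvPlace (c : String) : List (Option String) → List (List String) → List (Option String) × Bool
  | [], _ => ([], false)
  | s :: srest, [] => (s :: srest, false)
  | s :: srest, kws :: grest =>
      if s = none ∧ pvMatch kws c then (some c :: srest, true)
      else
        let r := pvPlace c srest grest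
        (s :: r.1, r.2)

def generic_pipeline_pattern_py_alt (components : List String) : List String :=
  let st := components.foldl
    (fun (st : List (Option String) × PySem.Set String) c =>
      if PySem.Set.contains st.2 c then st
      else
        let r := pvPlace c st.1 pvKwGroups
        (r.1, if r.2 then PySem.Set.add st.2 c else st.2))
    ([none, none, none, none, none], PySem.Set.empty)
  let pipeline := st.1.filterMap id
  (components.foldl
    (fun (acc : List String × PySem.Set String) c =>
      if PySem.Set.contains acc.2 c then acc
      else (acc.1 ++ [c], PySem.Set.add acc.2 c))
    (pipeline, st.2)).1

-- ===== PRECONDITION & SPEC =====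
def Spec_generic_pipeline_pattern_py (components : List String) (out : List String) : Prop := out = generic_pipeline_pattern_py_alt components
instance (components : List String) (out : List String) : Decidable (Spec_generic_pipeline_pattern_py components out) := by unfold Spec_generic_pipeline_pattern_py; infer_instance

-- ===== CLAIM (what is proved, stated in full; the proofs are below) =====
def Claim_equal_generic_pipeline_pattern_py : Prop := ∀ (components : List String), Dom_generic_pipeline_pattern_py components → Spec_generic_pipeline_pattern_py components (generic_pipeline_pattern_py components)

-- ===== LEMMAS AND PROOFS =====

-- Proof-side model.  A group state is a list of (keywords, slot) pairs.
-- `pickA excl kws L` = the element A's inner loop would append: the first element of L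
-- matching kws and not in excl.
def pickA (excl : List String) (kws : List String) : List String → Option String
  | [] => none
  | c :: L => if pvMatch kws c ∧ ¬ excl.contains c then some c else pickA excl kws L

-- group-major phase on a general group state (A's algorithm, slots kept in place)
def phaseA (L : List String) (excl : List String) : List (List String × Option String) → List (List String × Option String)
  | [] => []
  | (kws, some v) :: rest => (kws, some v) :: phaseA L excl rest
  | (kws, none) :: rest =>
      match pickA excl kws L with
      | some c => (kws, some c) :: phaseA L (excl ++ [c]) rest
      | none => (kws, none) :: phaseA L excl rest

-- component-major single step (B's placement, on the paired state)
def fillSlots (c : String) : List (List String × Option String) → List (List String × Option String)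
  | [] => []
  | (kws, some v) :: rest => (kws, some v) :: fillSlots c rest
  | (kws, none) :: rest =>
      if pvMatch kws c then (kws, some c) :: rest
      else (kws, none) :: fillSlots c rest

def placedB (c : String) : List (List String × Option String) → Bool
  | [] => false
  | (_, some _) :: rest => placedB c rest
  | (kws, none) :: rest => pvMatch kws c || placedB c rest

def filledIn (gs : List (List String × Option String)) (v : String) : Prop :=
  ∃ kws, (kws, some v) ∈ gs

-- abstract B fold step over the paired state with a plain seen list
def stepB (st : List (List String × Option String) × List String) (c : String) :
    List (List String × Option String) × List String :=
  if st.2.contains c then st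
  else (fillSlots c st.1, if placedB c st.1 then st.2 ++ [c] else st.2)

-- ---- basic pick lemmas ----
theorem pickA_congr (excl excl' kws : List String) (L : List String)
    (h : ∀ v, v ∈ excl ↔ v ∈ excl') : pickA excl kws L = pickA excl' kws L := by
  induction L with
  | nil => rfl
  | cons c L ih =>
      simp only [pickA]
      have : excl.contains c = excl'.contains c := by
        by_cases hc : c ∈ excl
        · simp [hc, (h c).mp hc]
        · have hc' : c ∉ excl' := fun hx => hc ((h c).mpr hx)
          simp [hc, hc']
      rw [this]
      split_ifs with h1
      · rfl
      · exact ih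

theorem pickA_mem_cons (excl kws : List String) (c : String) (L : List String)
    (h : c ∈ excl) : pickA excl kws (c :: L) = pickA excl kws L := by
  simp [pickA, h]

theorem pickA_not_match (excl kws : List String) (c : String) (L : List String)
    (h : pvMatch kws c = false) : pickA excl kws (c :: L) = pickA excl kws L := by
  simp [pickA, h]

theorem pickA_excl_irrelevant (excl kws : List String) (c : String) (L : List String)
    (h : pvMatch kws c = false) : pickA (excl ++ [c]) kws L = pickA excl kws L := by
  induction L with
  | nil => rfl
  | cons x L ih =>
      simp only [pickA]
      by_cases hm : pvMatch kws x
      · have hxc : x ≠ c := by intro he; rw [he] at hm; simp [h] at hm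
        have : (excl ++ [c]).contains x = excl.contains x := by
          simp [List.contains_eq_mem, hxc]
        rw [this]
        split_ifs with h1
        · rfl
        · exact ih
      · simp only [hm]; simp; exact ih

theorem pickA_spec (excl kws : List String) (L : List String) (c : String)
    (h : pickA excl kws L = some c) : pvMatch kws c = true ∧ c ∉ excl := by
  induction L with
  | nil => simp [pickA] at h
  | cons x L ih =>
      simp only [pickA] at h
      split_ifs at h with h1
      · cases h
        exact ⟨h1.1, by simpa using h1.2⟩
      · exact ih h

-- ---- phaseA facts ----
theorem phaseA_nil (excl : List String) (gs : List (List String × Option String)) :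
    phaseA [] excl gs = gs := by
  induction gs generalizing excl with
  | nil => rfl
  | cons g rest ih =>
      obtain ⟨kws, s⟩ := g
      cases s with
      | none => simp [phaseA, pickA, ih]
      | some v => simp [phaseA, ih]

theorem phaseA_congr (L : List String) (excl excl' : List String)
    (gs : List (List String × Option String)) (h : ∀ v, v ∈ excl ↔ v ∈ excl') :
    phaseA L excl gs = phaseA L excl' gs := by
  induction gs generalizing excl excl' with
  | nil => rfl
  | cons g rest ih =>
      obtain ⟨kws, s⟩ := g
      cases s with
      | some v => simp [phaseA, ih excl excl' h]
      | none =>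
          simp only [phaseA, pickA_congr excl excl' kws L h]
          cases hp : pickA excl' kws L with
          | none => simp [ih excl excl' h]
          | some c =>
              simp only []
              have : ∀ v, v ∈ excl ++ [c] ↔ v ∈ excl' ++ [c] := by
                intro v; simp [h v]
              simp [ih _ _ this]

-- duplicate component: prepending an already-excluded component changes nothing
theorem phaseA_skip (L : List String) (c : String) (excl : List String)
    (gs : List (List String × Option String)) (h : c ∈ excl) :
    phaseA (c :: L) excl gs = phaseA L excl gs := by
  induction gs generalizing excl with
  | nil => rfl
  | cons g rest ih =>
      obtain ⟨kws, s⟩ := g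
      cases s with
      | some v => simp [phaseA, ih excl h]
      | none =>
          simp only [phaseA, pickA_mem_cons excl kws c L h]
          cases hp : pickA excl kws L with
          | none => simp [ih excl h]
          | some d => simp [ih (excl ++ [d]) (by simp [h])]

-- the exchange lemma: processing a fresh component first (B's step) commutes with the
-- group-major phase
theorem phaseA_fill (L : List String) (c : String) :
    ∀ (gs : List (List String × Option String)) (excl : List String), c ∉ excl →
    phaseA (c :: L) excl gs =
      phaseA L (if placedB c gs then excl ++ [c] else excl) (fillSlots c gs) := by
  intro gs
  induction gs with
  | nil => intro excl _; simp [phaseA, fillSlots, placedB]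
  | cons g rest ih =>
      intro excl h
      obtain ⟨kws, s⟩ := g
      cases s with
      | some v =>
          have h1 : fillSlots c ((kws, some v) :: rest) = (kws, some v) :: fillSlots c rest := rfl
          have h2 : placedB c ((kws, some v) :: rest) = placedB c rest := rfl
          rw [h1, h2]
          have h3 : phaseA (c :: L) excl ((kws, some v) :: rest) =
              (kws, some v) :: phaseA (c :: L) excl rest := rfl
          rw [h3, ih excl h]
          split_ifs with hpl <;> rfl
      | none =>
          by_cases hm : pvMatch kws c
          · -- c is taken by this slot
            have hpick : pickA excl kws (c :: L) = some c := by
              simp [pickA, hm, h]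
            have hfill : fillSlots c ((kws, none) :: rest) = (kws, some c) :: rest := by
              simp [fillSlots, hm]
            have hplc : placedB c ((kws, none) :: rest) = true := by
              simp [placedB, hm]
            rw [hfill, hplc, if_pos rfl]
            have hL : phaseA (c :: L) excl ((kws, none) :: rest) =
                (kws, some c) :: phaseA (c :: L) (excl ++ [c]) rest := by
              simp [phaseA, hpick]
            have hR : phaseA L (excl ++ [c]) ((kws, some c) :: rest) =
                (kws, some c) :: phaseA L (excl ++ [c]) rest := rfl
            rw [hL, hR, phaseA_skip L c (excl ++ [c]) rest (by simp)]
          · -- this slot ignores c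
            have hmf : pvMatch kws c = false := by simpa using hm
            have hfill : fillSlots c ((kws, none) :: rest) = (kws, none) :: fillSlots c rest := by
              simp [fillSlots, hmf]
            have hplc : placedB c ((kws, none) :: rest) = placedB c rest := by
              simp [placedB, hmf]
            rw [hfill, hplc]
            have hstep : pickA excl kws (c :: L) = pickA excl kws L :=
              pickA_not_match excl kws c L hmf
            cases hp : pickA excl kws L with
            | none =>
                have hp' : pickA (if placedB c rest then excl ++ [c] else excl) kws L = none := by
                  split_ifs with hpl
                  · rw [pickA_excl_irrelevant excl kws c L hmf]; exact hp
                  · exact hp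
                have hL : phaseA (c :: L) excl ((kws, none) :: rest) =
                    (kws, none) :: phaseA (c :: L) excl rest := by
                  simp [phaseA, hstep, hp]
                have hR : phaseA L (if placedB c rest then excl ++ [c] else excl)
                    ((kws, none) :: fillSlots c rest) =
                    (kws, none) :: phaseA L (if placedB c rest then excl ++ [c] else excl)
                      (fillSlots c rest) := by
                  simp [phaseA, hp']
                rw [hL, hR, ih excl h]
            | some d =>
                have hd : pvMatch kws d = true ∧ d ∉ excl := pickA_spec excl kws L d hp
                have hdc : d ≠ c := by
                  intro he; rw [he] at hd; rw [hd.1] at hmf; cases hmf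
                have hp' : pickA (if placedB c rest then excl ++ [c] else excl) kws L = some d := by
                  split_ifs with hpl
                  · rw [pickA_excl_irrelevant excl kws c L hmf]; exact hp
                  · exact hp
                have hL : phaseA (c :: L) excl ((kws, none) :: rest) =
                    (kws, some d) :: phaseA (c :: L) (excl ++ [d]) rest := by
                  simp [phaseA, hstep, hp]
                have hR : phaseA L (if placedB c rest then excl ++ [c] else excl)
                    ((kws, none) :: fillSlots c rest) =
                    (kws, some d) :: phaseA L ((if placedB c rest then excl ++ [c] else excl) ++ [d])
                      (fillSlots c rest) := by
                  simp [phaseA, hp']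
                rw [hL, hR]
                have hc' : c ∉ excl ++ [d] := by
                  simp only [List.mem_append, List.mem_singleton]
                  rintro (h1 | h1)
                  · exact h h1
                  · exact hdc h1.symm
                rw [ih (excl ++ [d]) hc']
                split_ifs with hpl
                · exact congrArg _ (phaseA_congr L _ _ _ (by intro v; simp; tauto))
                · rfl

-- filled values as a membership of the projected slots
theorem filledIn_iff_mem (gs : List (List String × Option String)) (v : String) :
    filledIn gs v ↔ some v ∈ gs.map (·.2) := by
  constructor
  · rintro ⟨k, hk⟩; exact List.mem_map.mpr ⟨(k, some v), hk, rfl⟩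
  · intro h
    obtain ⟨⟨k, s⟩, hmem, hs⟩ := List.mem_map.mp h
    exact ⟨k, by cases hs; exact hmem⟩

-- placement adds exactly c to the filled values
theorem filledIn_fillSlots (c : String) (gs : List (List String × Option String)) (v : String) :
    filledIn (fillSlots c gs) v ↔ filledIn gs v ∨ (placedB c gs = true ∧ v = c) := by
  rw [filledIn_iff_mem, filledIn_iff_mem]
  induction gs with
  | nil => simp [fillSlots, placedB]
  | cons g rest ih =>
      obtain ⟨kws, s⟩ := g
      cases s with
      | some w =>
          have hfill : fillSlots c ((kws, some w) :: rest) = (kws, some w) :: fillSlots c rest := rfl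
          have hplc : placedB c ((kws, some w) :: rest) = placedB c rest := rfl
          rw [hfill, hplc]
          simp only [List.map_cons, List.mem_cons]
          tauto
      | none =>
          by_cases hm : pvMatch kws c
          · have hfill : fillSlots c ((kws, none) :: rest) = (kws, some c) :: rest := by
              simp [fillSlots, hm]
            have hplc : placedB c ((kws, none) :: rest) = true := by
              simp [placedB, hm]
            rw [hfill, hplc]
            simp only [List.map_cons, List.mem_cons, Option.some.injEq, true_and]
            constructor
            · rintro (h1 | h1)
              · exact Or.inr h1
              · exact Or.inl (Or.inr h1)
            · rintro ((h1 | h1) | h1)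
              · cases h1
              · exact Or.inr h1
              · exact Or.inl h1
          · have hmf : pvMatch kws c = false := by simpa using hm
            have hfill : fillSlots c ((kws, none) :: rest) = (kws, none) :: fillSlots c rest := by
              simp [fillSlots, hmf]
            have hplc : placedB c ((kws, none) :: rest) = placedB c rest := by
              simp [placedB, hmf]
            rw [hfill, hplc]
            simp only [List.map_cons, List.mem_cons]
            tauto

-- main run lemma: the group-major phase over L equals the component-major fold
theorem runEq (L : List String) :
    ∀ (gs : List (List String × Option String)) (seen excl : List String),
      (∀ v, v ∈ seen ↔ v ∈ excl) →
      phaseA L excl gs = (L.foldl stepB (gs, seen)).1 := by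
  induction L with
  | nil => intro gs seen excl _; simp [phaseA_nil]
  | cons c L ih =>
      intro gs seen excl hse
      simp only [List.foldl_cons]
      by_cases hc : c ∈ seen
      · have hce : c ∈ excl := (hse c).mp hc
        rw [phaseA_skip L c excl gs hce]
        have : stepB (gs, seen) c = (gs, seen) := by
          simp [stepB, List.contains_eq_mem, hc]
        rw [this]
        exact ih gs seen excl hse
      · have hce : c ∉ excl := fun hx => hc ((hse c).mpr hx)
        rw [phaseA_fill L c gs excl hce]
        have hstep : stepB (gs, seen) c =
            (fillSlots c gs, if placedB c gs then seen ++ [c] else seen) := by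
          simp [stepB, List.contains_eq_mem, hc]
        rw [hstep]
        split_ifs with hpl
        · exact ih _ _ _ (by intro v; simp [hse v])
        · exact ih _ _ _ hse

-- ---- relating port A to phaseA ----
theorem innerA_eq (p kws : List String) (L : List String) :
    pvInnerA p kws L = match pickA p kws L with
      | some c => p ++ [c]
      | none => p := by
  induction L with
  | nil => rfl
  | cons c L ih =>
      simp only [pvInnerA, pickA]
      by_cases hm : pvMatch kws c
      · by_cases hp : p.contains c
        · have : c ∈ p := by simpa using hp
          simp [hm, this, ih]
        · have : ¬ c ∈ p := by simpa using hp
          simp [hm, this]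
      · simp [hm, ih]

theorem foldA_phase (L : List String) :
    ∀ (kwss : List (List String)) (p : List String),
      kwss.foldl (fun p kws => pvInnerA p kws L) p =
        p ++ (phaseA L p (kwss.map (fun kws => (kws, none)))).filterMap (·.2) := by
  intro kwss
  induction kwss with
  | nil => intro p; simp [phaseA]
  | cons kws rest ih =>
      intro p
      rw [List.foldl_cons]
      have h1 := innerA_eq p kws L
      cases hp : pickA p kws L with
      | none =>
          rw [hp] at h1
          simp only at h1
          rw [h1, ih p]
          simp [phaseA, hp]
      | some c =>
          rw [hp] at h1
          simp only at h1
          rw [h1, ih (p ++ [c])]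
          simp [phaseA, hp]

-- ---- relating port B's concrete fold to the abstract one ----
-- pvPlace on the projected slots computes the paired fillSlots/placedB
theorem place_eq (c : String) :
    ∀ (gs : List (List String × Option String)),
      pvPlace c (gs.map (·.2)) (gs.map (·.1)) =
        ((fillSlots c gs).map (·.2), placedB c gs) := by
  intro gs
  induction gs with
  | nil => rfl
  | cons g rest ih =>
      obtain ⟨kws, s⟩ := g
      cases s with
      | some v => simp [pvPlace, fillSlots, placedB, ih]
      | none =>
          by_cases hm : pvMatch kws c
          · simp [pvPlace, fillSlots, placedB, hm]
          · simp [pvPlace, fillSlots, placedB, hm, ih]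

-- fillSlots keeps the keyword column
theorem fillSlots_fst (c : String) (gs : List (List String × Option String)) :
    (fillSlots c gs).map (·.1) = gs.map (·.1) := by
  induction gs with
  | nil => rfl
  | cons g rest ih =>
      obtain ⟨kws, s⟩ := g
      cases s with
      | some v => simp [fillSlots, ih]
      | none =>
          by_cases hm : pvMatch kws c
          · simp [fillSlots, hm]
          · simp [fillSlots, hm, ih]

-- an unplaced component leaves the slots unchanged
theorem fillSlots_of_not_placed (c : String) (gs : List (List String × Option String))
    (h : ¬ placedB c gs = true) : fillSlots c gs = gs := by
  induction gs with
  | nil => rfl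
  | cons g rest ih =>
      obtain ⟨kws, s⟩ := g
      cases s with
      | some v =>
          have h' : ¬ placedB c rest = true := h
          simp [fillSlots, ih h']
      | none =>
          have hm : pvMatch kws c = false := by
            by_contra hx
            exact h (by simp [placedB, Bool.of_not_eq_false hx])
          have h' : ¬ placedB c rest = true := by
            intro hx; exact h (by simp [placedB, hx])
          simp [fillSlots, hm, ih h']

-- port B's slot fold, transported to the paired state
theorem foldB_eq (L : List String) :
    ∀ (gs : List (List String × Option String)) (seen : List String),
      gs.map (·.1) = pvKwGroups →
      (∀ v, v ∈ seen ↔ filledIn gs v) →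
      L.foldl
        (fun (st : List (Option String) × PySem.Set String) c =>
          if PySem.Set.contains st.2 c then st
          else
            let r := pvPlace c st.1 pvKwGroups
            (r.1, if r.2 then PySem.Set.add st.2 c else st.2))
        (gs.map (·.2), seen) =
        ((L.foldl stepB (gs, seen)).1.map (·.2), (L.foldl stepB (gs, seen)).2) := by
  induction L with
  | nil => intro gs seen _ _; simp
  | cons c L ih =>
      intro gs seen hfst hinv
      simp only [List.foldl_cons]
      by_cases hc : c ∈ seen
      · have h1 : PySem.Set.contains seen c = true := by
          simpa [PySem.Set.contains_iff] using hc
        have h2 : stepB (gs, seen) c = (gs, seen) := by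
          simp [stepB, List.contains_eq_mem, hc]
        simp only [h1, if_pos, h2]
        exact ih gs seen hfst hinv
      · have h1 : ¬ PySem.Set.contains seen c = true := by
          simpa [PySem.Set.contains_iff] using hc
        have hplace : pvPlace c (gs.map (·.2)) pvKwGroups =
            ((fillSlots c gs).map (·.2), placedB c gs) := by
          rw [← hfst]; exact place_eq c gs
        have h2 : stepB (gs, seen) c =
            (fillSlots c gs, if placedB c gs then seen ++ [c] else seen) := by
          simp [stepB, List.contains_eq_mem, hc]
        simp only [h1, hplace, h2]
        have hadd : PySem.Set.add seen c = seen ++ [c] := by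
          simp [PySem.Set.add, List.contains_eq_mem, hc]
        have hfst' : (fillSlots c gs).map (·.1) = pvKwGroups := by
          rw [fillSlots_fst]; exact hfst
        by_cases hpl : placedB c gs
        · simp only [hpl, if_pos, hadd]
          exact ih _ _ hfst' (by
            intro v
            rw [filledIn_fillSlots]
            simp only [List.mem_append, List.mem_singleton, hinv v]
            tauto)
        · have hfill : fillSlots c gs = gs := fillSlots_of_not_placed c gs hpl
          simp only [hpl, Bool.false_eq_true, if_false, hfill]
          exact ih _ _ hfst hinv

-- remainder phase: the two dedup folds agree when seen and pipeline have the same members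
theorem remainder_eq (L : List String) :
    ∀ (p seen : List String), (∀ v, v ∈ seen ↔ v ∈ p) →
      L.foldl (fun p c => if p.contains c then p else p ++ [c]) p =
        (L.foldl
          (fun (acc : List String × PySem.Set String) c =>
            if PySem.Set.contains acc.2 c then acc
            else (acc.1 ++ [c], PySem.Set.add acc.2 c)) (p, seen)).1 := by
  induction L with
  | nil => intro p seen _; rfl
  | cons c L ih =>
      intro p seen hinv
      simp only [List.foldl_cons]
      by_cases hc : c ∈ p
      · have h1 : p.contains c = true := by simpa using hc
        have h2 : PySem.Set.contains seen c = true := by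
          simpa [PySem.Set.contains_iff] using (hinv c).mpr hc
        simp only [h1, if_pos, h2]
        exact ih p seen hinv
      · have h1 : ¬ p.contains c = true := by simpa using hc
        have hcs : c ∉ seen := fun hx => hc ((hinv c).mp hx)
        have h2 : ¬ PySem.Set.contains seen c = true := by
          simpa [PySem.Set.contains_iff] using hcs
        have hadd : PySem.Set.add seen c = seen ++ [c] := by
          simp [PySem.Set.add, List.contains_eq_mem, hcs]
        simp only [h1, h2, hadd]
        exact ih (p ++ [c]) (seen ++ [c]) (by intro v; simp [hinv v])

-- filled values of the final state have the same members as its filterMap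
theorem mem_filterMap_snd (gs : List (List String × Option String)) (v : String) :
    v ∈ gs.filterMap (·.2) ↔ filledIn gs v := by
  rw [filledIn_iff_mem]
  simp [List.mem_filterMap, List.mem_map]

-- initial paired state
def initGs : List (List String × Option String) := pvKwGroups.map (fun kws => (kws, none))

-- ===== VERDICT (by name: the statement is the Claim_ definition above) =====
theorem generic_pipeline_pattern_py_spec : Claim_equal_generic_pipeline_pattern_py := by
  intro components _
  unfold Spec_generic_pipeline_pattern_py generic_pipeline_pattern_py generic_pipeline_pattern_py_alt
  simp only []
  -- A's group phase = phaseA over initGs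
  rw [foldA_phase components pvKwGroups []]
  -- B's slot fold = abstract fold
  have hinit1 : initGs.map (·.1) = pvKwGroups := by decide
  have hinit2 : initGs.map (·.2) = [none, none, none, none, none] := by decide
  have hinv0 : ∀ v : String, v ∈ ([] : List String) ↔ filledIn initGs v := by
    intro v
    simp only [List.not_mem_nil, false_iff]
    rintro ⟨k, hk⟩
    simp [initGs, pvKwGroups] at hk
  have hB := foldB_eq components initGs [] hinit1 hinv0
  rw [hinit2] at hB
  have hempty : PySem.Set.empty = ([] : List String) := rfl
  rw [hempty, hB]
  -- the two phases compute the same slots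
  have hrun := runEq components initGs [] [] (by intro v; rfl)
  simp only [List.nil_append]
  have hgs : phaseA components [] initGs = (components.foldl stepB (initGs, [])).1 := hrun
  unfold initGs at hgs ⊢
  rw [hgs]
  -- remainder phases agree
  have hfm : ((components.foldl stepB (pvKwGroups.map (fun kws => (kws, none)), [])).1.map (·.2)).filterMap id =
      (components.foldl stepB (pvKwGroups.map (fun kws => (kws, none)), [])).1.filterMap (·.2) := by
    rw [List.filterMap_map]; rfl
  rw [hfm]
  apply remainder_eq
  intro v
  rw [mem_filterMap_snd]
  -- seen after the fold has the members of the filled slots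
  have hseen : ∀ (L : List String) (gs : List (List String × Option String)) (seen : List String),
      (∀ v, v ∈ seen ↔ filledIn gs v) →
      (∀ v, v ∈ (L.foldl stepB (gs, seen)).2 ↔ filledIn (L.foldl stepB (gs, seen)).1 v) := by
    intro L
    induction L with
    | nil => intro gs seen h; simpa using h
    | cons c L ihL =>
        intro gs seen h
        simp only [List.foldl_cons]
        by_cases hc : c ∈ seen
        · have : stepB (gs, seen) c = (gs, seen) := by
            simp [stepB, List.contains_eq_mem, hc]
          rw [this]; exact ihL gs seen h
        · have : stepB (gs, seen) c =
              (fillSlots c gs, if placedB c gs then seen ++ [c] else seen) := by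
            simp [stepB, List.contains_eq_mem, hc]
          rw [this]
          by_cases hpl : placedB c gs
          · simp only [hpl, if_pos]
            apply ihL
            intro v
            rw [filledIn_fillSlots]
            simp only [List.mem_append, List.mem_singleton, h v]
            tauto
          · have hfill : fillSlots c gs = gs := fillSlots_of_not_placed c gs hpl
            simp only [hpl, Bool.false_eq_true, if_false, hfill]
            exact ihL gs seen h
  exact (hseen components (pvKwGroups.map (fun kws => (kws, none))) []
    (by
      intro v
      simp only [List.not_mem_nil, false_iff]
      rintro ⟨k, hk⟩
      simp [pvKwGroups] at hk) v)
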